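-- pv_equiv track=rewrite | github.com/rafaelassacconi/pymega | html_table_parser/parser_functions.py | col_idx
-- ===== SOURCE A (Python) =====
-- def col_idx(twod, possible_headings):
--
--     cdx = None
--
--     possible_headings = possible_headings if type(possible_headings) == list else [possible_headings]
--
--     found_headings = []
--
--     for cell in twod[0]:
--         if type(cell) is str or type(cell):
--             found_headings.append(cell)
--         else:
--             # this is a hack for when cell is soup object instead of text
--             found_headings.append(cell.text)
--
--     for idx, found in enumerate([f.lower().strip() for f in found_headings]):
--         for possible in possible_headings:
--             if found == possible.lower().strip():
--                 cdx = idx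
--                 break
--
--     return cdx
-- ===== SOURCE B (Python) =====
-- def col_idx(twod, possible_headings):
--     possible_headings = possible_headings if type(possible_headings) == list else [possible_headings]
--     # map each normalized heading cell to its column index; later columns overwrite earlier ones
--     index = {}
--     for i, cell in enumerate(twod[0]):
--         index[cell.lower().strip()] = i
--     hits = [index[key] for key in (p.lower().strip() for p in possible_headings) if key in index]
--     return max(hits) if hits else None
-- ===== Notes on version B (the rewrite author's own statement) =====
-- stated objective: faster
-- what changed: Replaces A's nested loop (for every header cell rescan all possible headings, renormalizing them each time) by a single pass that builds a dict from normalized header cell to column index (last occurrence wins) and then queries it once per possible heading, returning the max of the hits.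
import Mathlib
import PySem

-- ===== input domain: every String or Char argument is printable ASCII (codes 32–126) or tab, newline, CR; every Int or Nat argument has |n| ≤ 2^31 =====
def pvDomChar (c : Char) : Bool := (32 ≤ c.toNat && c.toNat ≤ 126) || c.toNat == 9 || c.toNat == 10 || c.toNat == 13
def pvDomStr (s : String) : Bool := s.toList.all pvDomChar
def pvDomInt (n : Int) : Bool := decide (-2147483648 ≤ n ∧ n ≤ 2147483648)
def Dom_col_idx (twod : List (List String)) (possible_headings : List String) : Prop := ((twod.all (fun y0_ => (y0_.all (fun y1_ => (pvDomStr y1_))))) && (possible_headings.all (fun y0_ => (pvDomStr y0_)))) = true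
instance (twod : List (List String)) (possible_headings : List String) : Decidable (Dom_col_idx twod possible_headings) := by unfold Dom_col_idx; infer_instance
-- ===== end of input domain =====

-- B replaces A's nested scan (for each column, rescan all possible headings) by one pass that
-- indexes the header row's normalized cells by column (last index wins) and then queries that
-- index once per possible heading, taking the max of the hits. Objective: faster (asymptotic in Python).

-- ===== PORT A =====
-- inner 'for possible in possible_headings: if found == possible.lower().strip(): cdx = idx; break'
def colIdxInner (found : String) (idx : Int) (phs : List String) (cdx : Option Int) : Option Int :=
  match phs with
  | [] => cdx
  | p :: rest =>
    if found == PySem.Str.strip (PySem.Str.lower p) then some idx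
    else colIdxInner found idx rest cdx

def col_idx (twod : List (List String)) (possible_headings : List String) : Option Int :=
  -- 'possible_headings if type(possible_headings) == list else [possible_headings]':
  -- the parameter is a list here, so the check is True and this line is the identity.
  match PySem.List.pyGet? twod 0 with      -- twod[0]; none = IndexError, excluded by Pre_
  | none => none
  | some row =>
    -- 'type(cell) is str or type(cell)' is True for every str cell, so the first branch runs
    let found_headings := row.foldl (fun acc cell => acc ++ [cell]) []
    (PySem.List.enumerate (found_headings.map (fun f => PySem.Str.strip (PySem.Str.lower f)))).foldl
      (fun cdx iv => colIdxInner iv.2 iv.1 possible_headings cdx) none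

-- ===== PORT B =====
def col_idx_alt (twod : List (List String)) (possible_headings : List String) : Option Int :=
  match PySem.List.pyGet? twod 0 with      -- twod[0]; none = IndexError, excluded by Pre_
  | none => none
  | some row =>
    let index := (PySem.List.enumerate row).foldl
      (fun d p => d.insert (PySem.Str.strip (PySem.Str.lower p.2)) p.1)
      (PySem.Dict.empty : PySem.Dict String Int)
    let hits := possible_headings.filterMap
      (fun p => index.get? (PySem.Str.strip (PySem.Str.lower p)))
    PySem.List.max? hits (fun x => x)

-- ===== PRECONDITION & SPEC =====
-- A evaluates twod[0]: on twod = [] it raises IndexError, so the empty twod is excluded.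
def Pre_col_idx (twod : List (List String)) (possible_headings : List String) : Prop := twod ≠ []
instance (twod : List (List String)) (possible_headings : List String) : Decidable (Pre_col_idx twod possible_headings) := by unfold Pre_col_idx; infer_instance

def pvWitness_col_idx : List (List String) × List String := ([[" Name ", "Age"]], ["age"])

def Spec_col_idx (twod : List (List String)) (possible_headings : List String) (out : Option Int) : Prop := out = col_idx_alt twod possible_headings
instance (twod : List (List String)) (possible_headings : List String) (out : Option Int) : Decidable (Spec_col_idx twod possible_headings out) := by unfold Spec_col_idx; infer_instance

-- ===== CLAIM (what is proved, stated in full; the proofs are below) =====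
def Claim_equal_col_idx : Prop := ∀ (twod : List (List String)) (possible_headings : List String), Dom_col_idx twod possible_headings → Pre_col_idx twod possible_headings → Spec_col_idx twod possible_headings (col_idx twod possible_headings)

-- ===== LEMMAS AND PROOFS =====

-- normalization both programs apply to every compared string
def pvNrm (s : String) : String := PySem.Str.strip (PySem.Str.lower s)

-- does v match any possible heading (A's inner loop as a predicate)
def pvQ (phs : List String) (v : String) : Bool := phs.any (fun p => v == pvNrm p)

-- A's core on the header row
def pvA (row : List String) (phs : List String) : Option Int :=
  (PySem.List.enumerate (row.map pvNrm)).foldl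
    (fun cdx iv => colIdxInner iv.2 iv.1 phs cdx) none

-- B's index dict on the header row
def pvD (row : List String) : PySem.Dict String Int :=
  (PySem.List.enumerate row).foldl
    (fun d p => d.insert (pvNrm p.2) p.1) PySem.Dict.empty

-- B's core on the header row
def pvB (row : List String) (phs : List String) : Option Int :=
  PySem.List.max? (phs.filterMap (fun p => (pvD row).get? (pvNrm p))) (fun x => x)

lemma colIdxInner_eq (found : String) (idx : Int) (phs : List String) (cdx : Option Int) :
    colIdxInner found idx phs cdx = if pvQ phs found then some idx else cdx := by
  induction phs with
  | nil => simp [colIdxInner, pvQ]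
  | cons p rest ih =>
    simp only [colIdxInner, ih, pvQ, List.any_cons]
    cases h : (found == PySem.Str.strip (PySem.Str.lower p)) <;> simp [pvNrm, h]

lemma enumerate_append_singleton (l : List α) (x : α) (s : Int) :
    PySem.List.enumerate (l ++ [x]) s = PySem.List.enumerate l s ++ [(s + l.length, x)] := by
  induction l generalizing s with
  | nil => simp [PySem.List.enumerate_cons, PySem.List.enumerate_nil]
  | cons y t ih =>
    simp only [List.cons_append, PySem.List.enumerate_cons, ih, List.length_cons]
    norm_num
    ring_nf

lemma pvA_append (row : List String) (x : String) (phs : List String) :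
    pvA (row ++ [x]) phs
      = if pvQ phs (pvNrm x) then some (row.length : Int) else pvA row phs := by
  simp only [pvA, List.map_append, List.map_cons, List.map_nil,
    enumerate_append_singleton, List.foldl_append, List.foldl_cons, List.foldl_nil,
    List.length_map, colIdxInner_eq]
  norm_num

lemma pvD_append (row : List String) (x : String) :
    pvD (row ++ [x]) = (pvD row).insert (pvNrm x) (row.length : Int) := by
  simp only [pvD, enumerate_append_singleton, List.foldl_append, List.foldl_cons, List.foldl_nil]
  norm_num

lemma pvD_bound (row : List String) (k : String) (i : Int) :
    (pvD row).get? k = some i → 0 ≤ i ∧ i < row.length := by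
  induction row using List.reverseRecOn generalizing k i with
  | nil => simp [pvD, PySem.List.enumerate_nil, PySem.Dict.get?_empty]
  | append_singleton t x ih =>
    rw [pvD_append]
    by_cases hk : k = pvNrm x
    · subst hk
      rw [PySem.Dict.get?_insert_self]
      intro h
      injection h with h; subst h
      refine ⟨by positivity, ?_⟩
      simp only [List.length_append, List.length_cons, List.length_nil]
      push_cast; omega
    · rw [PySem.Dict.get?_insert_of_ne _ _ hk]
      intro h
      have := ih k i h
      simp only [List.length_append, List.length_cons, List.length_nil]
      push_cast
      omega

lemma pvB_append (row : List String) (x : String) (phs : List String) :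
    pvB (row ++ [x]) phs
      = if pvQ phs (pvNrm x) then some (row.length : Int) else pvB row phs := by
  simp only [pvB, pvD_append]
  by_cases hq : pvQ phs (pvNrm x)
  · simp only [hq, if_true]
    -- the new index row.length is a hit and dominates every other hit
    set hits := phs.filterMap
      (fun p => (((pvD row).insert (pvNrm x) (row.length : Int))).get? (pvNrm p)) with hhits
    have hmem : (row.length : Int) ∈ hits := by
      rcases List.any_eq_true.mp hq with ⟨p, hp, hpe⟩
      have hpe' : pvNrm p = pvNrm x := by
        have := eq_of_beq hpe; exact this.symm
      refine List.mem_filterMap.mpr ⟨p, hp, ?_⟩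
      rw [hpe', PySem.Dict.get?_insert_self]
    have hub : ∀ y ∈ hits, y ≤ (row.length : Int) := by
      intro y hy
      rcases List.mem_filterMap.mp hy with ⟨p, _, hg⟩
      by_cases hpx : pvNrm p = pvNrm x
      · rw [hpx, PySem.Dict.get?_insert_self] at hg
        injection hg with hg; omega
      · rw [PySem.Dict.get?_insert_of_ne _ _ hpx] at hg
        have := pvD_bound row _ _ hg
        omega
    have hne : hits ≠ [] := by
      intro h; rw [h] at hmem; exact absurd hmem (List.not_mem_nil)
    have hmax : PySem.List.max? hits (fun x : Int => x) ≠ none :=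
      fun h => hne ((PySem.List.max?_eq_none_iff hits (fun x : Int => x)).mp h)
    rcases Option.ne_none_iff_exists'.mp hmax with ⟨m, hm⟩
    have h1 : m ∈ hits := PySem.List.max?_mem hm
    have h2 := PySem.List.max?_isMax hm _ hmem
    have h3 := hub m h1
    rw [hm]
    congr 1
    omega
  · simp only [hq]
    congr 1
    apply List.filterMap_congr
    intro p hp
    have hpx : pvNrm p ≠ pvNrm x := by
      intro h
      apply absurd hq
      simp only [pvQ, List.any_eq_true, not_not]
      exact ⟨p, hp, beq_iff_eq.mpr h.symm⟩
    rw [PySem.Dict.get?_insert_of_ne _ _ hpx]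

lemma core_eq (row : List String) (phs : List String) : pvA row phs = pvB row phs := by
  induction row using List.reverseRecOn with
  | nil =>
    simp [pvA, pvB, pvD, PySem.List.enumerate_nil, PySem.Dict.get?_empty, PySem.List.max?]
  | append_singleton t x ih => rw [pvA_append, pvB_append, ih]

-- ===== VERDICT (by name: the statement is the Claim_ definition above) =====
theorem col_idx_spec : Claim_equal_col_idx := by
  intro twod phs _ hpre
  unfold Spec_col_idx col_idx col_idx_alt
  match twod, hpre with
  | row :: rest, _ =>
    have hget : PySem.List.pyGet? (row :: rest) 0 = some row := by
      simp [PySem.List.pyGet?, PySem.List.pyIdx?]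
    rw [hget]
    simp only [PySem.List.foldl_append_singleton, List.nil_append]
    exact core_eq row phs
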